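-- pv_equiv track=rewrite | github.com/lucasgasparbal/algo1-fcen | guia7/e1.py | digitos_impares
-- ===== SOURCE A (Python) =====
-- def digitos_impares(num:int)->list[int]:
--     digitos:list[int] = []
--     while( num > 10):
--         digito:int = num % 10
--         if(digito % 2 != 0):
--             digitos.append(digito)
--
--         num = num // 10
--
--
--     if (num % 2 != 0):
--         digitos.append(num)
--
--     return digitos
-- ===== SOURCE B (Python) =====
-- def digitos_impares(num: int) -> list[int]:
--     if num > 10:
--         d = num % 10
--         rest = digitos_impares(num // 10)
--         return [d] + rest if d % 2 != 0 else rest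
--     return [num] if num % 2 != 0 else []
-- ===== Notes on version B (the rewrite author's own statement) =====
-- stated objective: alternative
-- what changed: Replaced the while-loop with an accumulator list by a direct recursion over the digits that builds the result front-to-back by consing, with the final remainder check as the base case.
import Mathlib
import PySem

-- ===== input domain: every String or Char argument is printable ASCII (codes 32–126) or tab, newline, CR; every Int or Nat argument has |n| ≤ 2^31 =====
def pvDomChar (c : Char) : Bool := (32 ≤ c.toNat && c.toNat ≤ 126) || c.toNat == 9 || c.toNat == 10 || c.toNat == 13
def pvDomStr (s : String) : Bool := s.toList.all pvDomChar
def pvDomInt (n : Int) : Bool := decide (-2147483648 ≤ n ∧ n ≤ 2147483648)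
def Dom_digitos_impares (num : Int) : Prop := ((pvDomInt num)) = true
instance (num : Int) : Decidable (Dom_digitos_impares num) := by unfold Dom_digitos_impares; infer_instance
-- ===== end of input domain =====

-- B replaces A's while-loop-with-accumulator by a direct recursion over the digits (alternative decomposition, same cost).

-- termination measure lemma for both recursions
theorem pvFloordiv_toNat_lt (num : Int) (h : num > 10) :
    (PySem.Int.floordiv num 10).toNat < num.toNat := by
  rw [PySem.Int.floordiv_eq_ediv_of_pos (by omega)]
  omega

-- ===== PORT A =====
def pvLoopA (num : Int) (digitos : List Int) : List Int :=
  if h : num > 10 then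
    let digito : Int := PySem.Int.mod num 10
    let digitos' := if PySem.Int.mod digito 2 ≠ 0 then digitos ++ [digito] else digitos
    pvLoopA (PySem.Int.floordiv num 10) digitos'
  else
    if PySem.Int.mod num 2 ≠ 0 then digitos ++ [num] else digitos
termination_by num.toNat
decreasing_by exact pvFloordiv_toNat_lt num h

def digitos_impares (num : Int) : List Int := pvLoopA num []

-- ===== PORT B =====
def digitos_impares_alt (num : Int) : List Int :=
  if h : num > 10 then
    let d : Int := PySem.Int.mod num 10
    let rest := digitos_impares_alt (PySem.Int.floordiv num 10)
    if PySem.Int.mod d 2 ≠ 0 then d :: rest else rest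
  else
    if PySem.Int.mod num 2 ≠ 0 then [num] else []
termination_by num.toNat
decreasing_by exact pvFloordiv_toNat_lt num h

-- ===== PRECONDITION & SPEC =====
def Spec_digitos_impares (num : Int) (out : List Int) : Prop := out = digitos_impares_alt num
instance (num : Int) (out : List Int) : Decidable (Spec_digitos_impares num out) := by unfold Spec_digitos_impares; infer_instance

-- ===== CLAIM (what is proved, stated in full; the proofs are below) =====
def Claim_equal_digitos_impares : Prop := ∀ (num : Int), Dom_digitos_impares num → Spec_digitos_impares num (digitos_impares num)

-- ===== LEMMAS AND PROOFS =====
theorem pvLoopA_acc (num : Int) (acc : List Int) :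
    pvLoopA num acc = acc ++ digitos_impares_alt num := by
  induction num, acc using pvLoopA.induct with
  | case1 num acc h digito digitos' ih =>
    rw [pvLoopA, digitos_impares_alt]
    simp only [h, dif_pos]
    simp only [digitos', digito, dite_eq_ite] at ih
    rw [ih]
    split_ifs <;> simp
  | case2 num acc h h2 =>
    rw [pvLoopA, digitos_impares_alt]
    simp only [h, dif_neg, not_false_iff]
    split_ifs <;> simp
  | case3 num acc h h2 =>
    rw [pvLoopA, digitos_impares_alt]
    simp only [h, dif_neg, not_false_iff]
    split_ifs <;> simp

-- ===== VERDICT (by name: the statement is the Claim_ definition above) =====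
theorem digitos_impares_spec : Claim_equal_digitos_impares := by
  intro num _
  unfold Spec_digitos_impares digitos_impares
  exact pvLoopA_acc num []
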